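-- pv_equiv track=rewrite | github.com/alonana/top | python/2019/erase_to_gcd.py | recurse
-- ===== SOURCE A (Python) =====
-- def gcd(a, b):
--     while b != 0:
--         a, b = b, a % b
--     return a
--
-- def recurse(collected, remaining, goal):
--     if len(collected) >= 2:
--         g = gcd(collected[-1], collected[-2])
--         if g > goal:
--             return 0
--
--     if len(remaining) == 0:
--         if len(collected) == 1:
--             if collected[0] == goal:
--                 return 1
--             else:
--                 return 0
--         if gcd(collected[-1], collected[-2]) == goal:
--             return 1
--         else:
--             return 0
--
--     next_remaining = remaining[1:]
--     next_collected = collected.copy()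
--     next_collected.append(remaining[0])
--     return recurse(next_collected, next_remaining, goal) + recurse(collected, next_remaining, goal)
-- ===== SOURCE B (Python) =====
-- def gcd(a, b):
--     while b != 0:
--         a, b = b, a % b
--     return a
--
-- def recurse(collected, remaining, goal):
--     # O(n^2) backward DP instead of A's O(2^n) include/exclude recursion.
--     last = collected[-1]
--     if len(collected) >= 2:
--         g0 = gcd(last, collected[-2])
--         if g0 > goal:
--             return 0
--         base = 1 if g0 == goal else 0
--     else:
--         base = 1 if last == goal else 0
--     n = len(remaining)
--     prevs = [last] + remaining
--     # w[j] = number of non-empty chains picked from the current suffix, started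
--     # after prevs[j], with every adjacent gcd <= goal and the last gcd == goal
--     w = [0] * (n + 1)
--     for i in range(n - 1, -1, -1):
--         x = remaining[i]
--         wx = w[i + 1]
--         w = [w[j] + (((1 if gcd(x, prevs[j]) == goal else 0) + wx)
--                      if gcd(x, prevs[j]) <= goal else 0)
--              for j in range(n + 1)]
--     return base + w[0]
-- ===== Notes on version B (the rewrite author's own statement) =====
-- stated objective: faster
-- what changed: A's exponential include/exclude recursion over all subsets is replaced by a backward dynamic program over suffixes that keeps, for each possible previous chain element, the count of valid chains in the remaining suffix.
import Mathlib
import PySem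

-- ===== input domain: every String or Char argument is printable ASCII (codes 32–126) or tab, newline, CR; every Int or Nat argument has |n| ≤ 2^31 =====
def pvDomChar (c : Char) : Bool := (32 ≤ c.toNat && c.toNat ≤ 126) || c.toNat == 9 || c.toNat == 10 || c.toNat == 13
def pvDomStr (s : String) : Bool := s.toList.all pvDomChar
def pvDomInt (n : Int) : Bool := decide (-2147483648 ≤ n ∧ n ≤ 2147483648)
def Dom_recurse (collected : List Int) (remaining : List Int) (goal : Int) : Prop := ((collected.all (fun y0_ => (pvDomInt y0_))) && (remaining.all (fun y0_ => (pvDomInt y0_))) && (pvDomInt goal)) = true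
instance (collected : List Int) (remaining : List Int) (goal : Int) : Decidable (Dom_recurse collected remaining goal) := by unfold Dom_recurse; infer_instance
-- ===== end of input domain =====

-- B replaces A's exponential include/exclude recursion by a quadratic backward DP over suffixes.

-- Python's while-loop gcd (floored %, so not symmetric on negatives); shared helper of both sources.
-- pymod_natAbs_lt is cited by pygcd's decreasing_by, so it stays above the ports.
theorem pymod_natAbs_lt (a b : Int) (h : b ≠ 0) : (PySem.Int.mod a b).natAbs < b.natAbs := by
  rcases lt_or_gt_of_ne h with hb | hb
  · have h1 := PySem.Int.mod_neg_bounds a hb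
    omega
  · have h1 := PySem.Int.mod_nonneg a hb
    have h2 := PySem.Int.mod_lt a hb
    omega

def pygcd (a b : Int) : Int :=
  if h : b = 0 then a else pygcd b (PySem.Int.mod a b)
termination_by b.natAbs
decreasing_by exact pymod_natAbs_lt a b h

-- ===== PORT A =====
def recurse (collected : List Int) (remaining : List Int) (goal : Int) : Int :=
  if 2 ≤ collected.length ∧
      goal < pygcd ((PySem.List.pyGet? collected (-1)).getD 0)
                   ((PySem.List.pyGet? collected (-2)).getD 0) then 0
  else
    match remaining with
    | [] =>
      if collected.length = 1 then
        if (PySem.List.pyGet? collected 0).getD 0 = goal then 1 else 0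
      else
        if pygcd ((PySem.List.pyGet? collected (-1)).getD 0)
                 ((PySem.List.pyGet? collected (-2)).getD 0) = goal then 1 else 0
    | x :: rest => recurse (collected ++ [x]) rest goal + recurse collected rest goal
termination_by remaining.length

-- ===== PORT B =====
-- one iteration of B's loop: the list comprehension rebuilding w at index i
def altStep (goal : Int) (remaining prevs : List Int) (w : List Int) (i : Nat) : List Int :=
  let x := remaining.getD i 0
  let wx := w.getD (i + 1) 0
  (List.range (remaining.length + 1)).map (fun j =>
    w.getD j 0 +
      (if pygcd x (prevs.getD j 0) ≤ goal then
        (if pygcd x (prevs.getD j 0) = goal then 1 else 0) + wx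
      else 0))

-- the DP loop of Source B (range(n-1,-1,-1) = the reversed range) plus the final return
def altCore (last : Int) (base : Int) (remaining : List Int) (goal : Int) : Int :=
  let n := remaining.length
  let prevs := last :: remaining
  let w := ((List.range n).reverse).foldl (altStep goal remaining prevs) (List.replicate (n + 1) 0)
  base + w.getD 0 0

def recurse_alt (collected : List Int) (remaining : List Int) (goal : Int) : Int :=
  let last := (PySem.List.pyGet? collected (-1)).getD 0
  if 2 ≤ collected.length then
    let g0 := pygcd last ((PySem.List.pyGet? collected (-2)).getD 0)
    if goal < g0 then 0
    else altCore last (if g0 = goal then 1 else 0) remaining goal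
  else altCore last (if last = goal then 1 else 0) remaining goal

-- ===== PRECONDITION & SPEC =====
-- Pre_ excludes exactly collected = [], on which Python A raises IndexError (collected[-1]
-- on the all-exclude leaf); B raises the same IndexError there.
def Pre_recurse (collected : List Int) (remaining : List Int) (goal : Int) : Prop :=
  collected ≠ []
instance (collected : List Int) (remaining : List Int) (goal : Int) : Decidable (Pre_recurse collected remaining goal) := by unfold Pre_recurse; infer_instance

def pvWitness_recurse : List Int × List Int × Int := ([6], [4, 2, 3], 2)

def Spec_recurse (collected : List Int) (remaining : List Int) (goal : Int) (out : Int) : Prop := out = recurse_alt collected remaining goal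
instance (collected : List Int) (remaining : List Int) (goal : Int) (out : Int) : Decidable (Spec_recurse collected remaining goal out) := by unfold Spec_recurse; infer_instance

-- ===== CLAIM (what is proved, stated in full; the proofs are below) =====
def Claim_equal_recurse : Prop := ∀ (collected : List Int) (remaining : List Int) (goal : Int), Dom_recurse collected remaining goal → Pre_recurse collected remaining goal → Spec_recurse collected remaining goal (recurse collected remaining goal)

-- ===== LEMMAS AND PROOFS =====

-- Wf goal p rs = number of non-empty chains picked (in order) from rs, appended after a
-- chain ending in p, with every adjacent gcd ≤ goal and the last gcd = goal.
def Wf (goal : Int) : Int → List Int → Int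
  | _, [] => 0
  | p, x :: rs =>
      Wf goal p rs +
        (if pygcd x p ≤ goal then (if pygcd x p = goal then 1 else 0) + Wf goal x rs else 0)

theorem pyLast_append (c : List Int) (x : Int) :
    (PySem.List.pyGet? (c ++ [x]) (-1)).getD 0 = x := by
  rw [PySem.List.pyGet?_neg_one_append_singleton]; rfl

theorem pyLast2_append (c : List Int) (x : Int) (h : c ≠ []) :
    (PySem.List.pyGet? (c ++ [x]) (-2)).getD 0 = (PySem.List.pyGet? c (-1)).getD 0 := by
  have hl : 0 < c.length := List.length_pos_iff.mpr h
  rw [PySem.List.pyGet?_neg_ofNat (c ++ [x]) 2 (by omega) (by simpa using hl),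
    PySem.List.pyGet?_neg_one]
  have he : (c ++ [x]).length - 2 = c.length - 1 := by simp
  rw [he, List.getElem?_append_left (by omega), List.getLast?_eq_getElem?]

-- characterisation of A's exponential recursion via Wf
theorem recurse_eq_Wf (goal : Int) :
    ∀ (remaining collected : List Int), collected ≠ [] →
      recurse collected remaining goal =
        (if 2 ≤ collected.length then
          (if goal < pygcd ((PySem.List.pyGet? collected (-1)).getD 0)
                           ((PySem.List.pyGet? collected (-2)).getD 0) then 0
           else
            (if pygcd ((PySem.List.pyGet? collected (-1)).getD 0)
                      ((PySem.List.pyGet? collected (-2)).getD 0) = goal then 1 else 0) +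
              Wf goal ((PySem.List.pyGet? collected (-1)).getD 0) remaining)
        else
          (if (PySem.List.pyGet? collected (-1)).getD 0 = goal then 1 else 0) +
            Wf goal ((PySem.List.pyGet? collected (-1)).getD 0) remaining) := by
  intro remaining
  induction remaining with
  | nil =>
    intro c hc
    by_cases h2 : 2 ≤ c.length
    · by_cases hg : goal < pygcd ((PySem.List.pyGet? c (-1)).getD 0) ((PySem.List.pyGet? c (-2)).getD 0)
      · simp [recurse, h2, hg]
      · simp [recurse, Wf, h2, hg]
        omega
    · rcases c with _ | ⟨a, _ | ⟨b, t⟩⟩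
      · exact absurd rfl hc
      · simp [recurse, Wf, PySem.List.pyGet?_neg_one]
      · exact absurd (by simp) h2
  | cons x rs ih =>
    intro c hc
    have hA := ih (c ++ [x]) (by simp)
    rw [pyLast_append, pyLast2_append c x hc] at hA
    have hlen : 2 ≤ (c ++ [x]).length := by
      have := List.length_pos_iff.mpr hc; simp; omega
    simp only [hlen, if_true] at hA
    have hB := ih c hc
    rw [recurse]
    by_cases h2 : 2 ≤ c.length
    · by_cases hg : goal < pygcd ((PySem.List.pyGet? c (-1)).getD 0) ((PySem.List.pyGet? c (-2)).getD 0)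
      · simp [h2, hg]
      · simp only [h2, hg, if_true, if_false, true_and] at hB ⊢
        rw [hA, hB, Wf]
        split_ifs <;> omega
    · simp only [h2, if_false, false_and] at hB ⊢
      rw [hA, hB, Wf]
      split_ifs <;> omega

theorem getD_map_range_int (n : Nat) (f : Nat → Int) (j : Nat) (h : j < n) :
    ((List.range n).map f).getD j 0 = f j := by
  rw [List.getD_eq_getElem?_getD]; simp [h]

-- the fold invariant: after processing indices n-1 … n-k, entry j of w holds Wf of the suffix
theorem altLoop_invariant (goal last : Int) (remaining : List Int) :
    ∀ (k : Nat), k ≤ remaining.length → ∀ j ≤ remaining.length,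
      (((List.range' (remaining.length - k) k).reverse).foldl
          (altStep goal remaining (last :: remaining))
          (List.replicate (remaining.length + 1) 0)).getD j 0 =
        Wf goal ((last :: remaining).getD j 0) (remaining.drop (remaining.length - k)) := by
  intro k
  induction k with
  | zero =>
    intro _ j _
    simp [Wf, List.getD]
  | succ k ihk =>
    intro hk j hj
    have hk' : k ≤ remaining.length := by omega
    have hi : remaining.length - (k + 1) < remaining.length := by omega
    have hik : remaining.length - (k + 1) + 1 = remaining.length - k := by omega
    have hsplit : List.range' (remaining.length - (k + 1)) (k + 1) =
        (remaining.length - (k + 1)) :: List.range' (remaining.length - k) k := by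
      rw [List.range'_succ, hik]
    rw [hsplit, List.reverse_cons, List.foldl_append]
    simp only [List.foldl_cons, List.foldl_nil]
    simp only [altStep]
    rw [getD_map_range_int _ _ j (by omega)]
    have hx : remaining.getD (remaining.length - (k + 1)) 0 = remaining[remaining.length - (k+1)] := by
      rw [List.getD_eq_getElem?_getD]; simp [hi]
    have hdrop : remaining.drop (remaining.length - (k + 1)) =
        remaining[remaining.length - (k+1)] :: remaining.drop (remaining.length - k) := by
      rw [List.drop_eq_getElem_cons hi, hik]
    rw [ihk hk' j hj, hik, ihk hk' (remaining.length - k) (by omega)]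
    have hprev : (last :: remaining).getD (remaining.length - k) 0 = remaining[remaining.length - (k+1)] := by
      have : remaining.length - k = (remaining.length - (k+1)) + 1 := by omega
      rw [this, List.getD_cons_succ, List.getD_eq_getElem?_getD]
      simp [hi]
    rw [hdrop, Wf, hx, hprev]

theorem altCore_eq_Wf (last base : Int) (remaining : List Int) (goal : Int) :
    altCore last base remaining goal = base + Wf goal last remaining := by
  simp only [altCore]
  have h := altLoop_invariant goal last remaining remaining.length le_rfl 0 (by omega)
  rw [List.range_eq_range']
  simp only [Nat.sub_self] at h
  rw [h]
  simp

-- ===== VERDICT (by name: the statement is the Claim_ definition above) =====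
theorem recurse_spec : Claim_equal_recurse := by
  intro collected remaining goal _ hpre
  unfold Spec_recurse
  rw [recurse_eq_Wf goal remaining collected hpre]
  unfold recurse_alt
  by_cases h2 : 2 ≤ collected.length
  · simp only [h2, if_true]
    by_cases hg : goal < pygcd ((PySem.List.pyGet? collected (-1)).getD 0)
        ((PySem.List.pyGet? collected (-2)).getD 0)
    · simp [hg]
    · simp [hg, altCore_eq_Wf]
  · simp [h2, altCore_eq_Wf]
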